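-- pv_equiv track=rewrite | github.com/micahwar/AOC | 2020/day14.py | part2
-- ===== SOURCE A (Python) =====
-- def getPossible(numString):
--     possible = []
--     if "X" in numString:
--
--         for i in range(2):
--             possible.append(numString.replace("X", str(i), 1))
--             for x in getPossible(numString.replace("X", str(i), 1)):
--                 possible.append(x)
--
--
--     return possible
--
-- def maskNum2(val, mask):
--     val = list(str(str(bin(val))[2:]).zfill(36))
--     locations = []
--     for n, character in enumerate(mask):
--         if character == "1":
--             val[n] = character
--         elif character == "X":
--             val[n] = character
--     locations = [int(x, 2) for x in getPossible("".join(val)) if x.find("X") == -1]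
--     return locations
--
-- def part2(data):
--     total = 0
--     finalValues = {}
--     for group in data:
--         mask = group[0]
--         mems = group[1]
--         for mem in mems:
--             value = mem[1]
--             for location in maskNum2(mem[0], mask):
--                 finalValues[location] = value
--     for x in finalValues:
--         total += finalValues[x]
--     return total
-- ===== SOURCE B (Python) =====
-- def part2(data):
--     final = {}
--     for mask, mems in data:
--         for addr, value in mems:
--             # masked 36-bit pattern: the address bits with mask's '1'/'X' forced in
--             pat = list(bin(addr)[2:].zfill(36))
--             for n, c in enumerate(mask):
--                 if c == "1" or c == "X":
--                     pat[n] = c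
--             xpos = [n for n, c in enumerate(pat) if c == "X"]
--             if xpos:  # a pattern without floating bits performs no write (as in A)
--                 cands = [pat]
--                 for n in xpos:
--                     nxt = []
--                     for c in cands:
--                         c0 = c[:]
--                         c0[n] = "0"
--                         nxt.append(c0)
--                         c1 = c[:]
--                         c1[n] = "1"
--                         nxt.append(c1)
--                     cands = nxt
--                 for c in cands:
--                     final[int("".join(c), 2)] = value
--     return sum(final.values())
-- ===== Notes on version B (the rewrite author's own statement) =====
-- stated objective: alternative
-- what changed: Replaces A's recursive enumeration (repeatedly string.replace-ing the first 'X' and filtering the partially-substituted strings back out) by collecting the floating ('X') positions once and doubling a candidate list per position with direct index assignment, so only the 2^k concrete patterns are ever built; the final total uses sum(final.values()) instead of a manual key loop.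
-- outside the precondition, e.g. on part2([('                                X', [(-5, 3)])]): A returns 6, B returns 6
import Mathlib
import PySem

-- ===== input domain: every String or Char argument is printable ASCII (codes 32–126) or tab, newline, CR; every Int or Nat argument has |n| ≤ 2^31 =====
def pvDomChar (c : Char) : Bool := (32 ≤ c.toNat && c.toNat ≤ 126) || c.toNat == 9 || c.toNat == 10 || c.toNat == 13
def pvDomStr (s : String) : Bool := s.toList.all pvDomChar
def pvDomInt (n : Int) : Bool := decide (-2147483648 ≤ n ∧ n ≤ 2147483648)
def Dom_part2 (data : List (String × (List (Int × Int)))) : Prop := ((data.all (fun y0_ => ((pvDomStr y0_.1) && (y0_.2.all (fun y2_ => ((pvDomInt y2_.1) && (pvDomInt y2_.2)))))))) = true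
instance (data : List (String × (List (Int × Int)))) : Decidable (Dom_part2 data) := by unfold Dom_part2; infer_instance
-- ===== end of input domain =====

-- B replaces A's recursive first-X string.replace enumeration (which also builds and filters
-- all partially-substituted strings) by collecting the floating positions once and doubling a
-- candidate list per position via direct index assignment (objective: alternative, not timed faster).

-- ===== PORT A =====

-- s.replace("X", d, 1): hand port, exact because the pattern is the single character 'X'
def pvRepFirstX (d : Char) : List Char → List Char
  | [] => []
  | c :: cs => if c = 'X' then d :: cs else c :: pvRepFirstX d cs

-- "X" in s  ↔  'X' ∈ s (termination fact for getPossible, cited by the port)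
theorem pvIsInX_iff (cs : List Char) : PySem.Chars.isIn ['X'] cs = true ↔ 'X' ∈ cs := by
  rw [PySem.Chars.isIn_iff_infix]
  constructor
  · rintro ⟨s, t, rfl⟩; simp
  · intro h
    obtain ⟨s, t, rfl⟩ := List.append_of_mem h
    exact ⟨s, t, by simp⟩

theorem pvRepFirstX_count_lt (d : Char) (hd : ¬ d = 'X') (cs : List Char) (h : 'X' ∈ cs) :
    (pvRepFirstX d cs).count 'X' < cs.count 'X' := by
  induction cs with
  | nil => simp at h
  | cons c cs ih =>
    by_cases hc : c = 'X'
    · subst hc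
      simp [pvRepFirstX, hd]
    · simp [pvRepFirstX, hc] at h ⊢
      rcases h with h | h
      · exact absurd h.symm hc
      · have := ih h
        omega

-- getPossible(numString), recursion and append order as in A
def getPossible (cs : List Char) : List (List Char) :=
  if h : PySem.Chars.isIn ['X'] cs = true then
    (pvRepFirstX '0' cs :: getPossible (pvRepFirstX '0' cs)) ++
      (pvRepFirstX '1' cs :: getPossible (pvRepFirstX '1' cs))
  else []
termination_by cs.count 'X'
decreasing_by
  · exact pvRepFirstX_count_lt '0' (by decide) cs ((pvIsInX_iff cs).mp h)
  · exact pvRepFirstX_count_lt '1' (by decide) cs ((pvIsInX_iff cs).mp h)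

-- int(x, 2): exact wherever Python raises no ValueError (guaranteed under Pre_)
def pvInt2 (cs : List Char) : Int := (PySem.Int.ofCharsBase? cs 2).getD 0

-- list(str(bin(val))[2:].zfill(36)) — this same expression occurs in both Pythons
def pvBits (val : Int) : List Char :=
  PySem.Chars.zfill (PySem.List.slice (PySem.Int.toBinChars0b val) (some 2) none) 36

-- maskNum2(val, mask); val[n] = character is pySetD, exact under Pre_ (index in range there)
def maskNum2 (val : Int) (mask : List Char) : List Int :=
  let v := (PySem.List.enumerate mask 0).foldl
    (fun v p =>
      if p.2 = '1' then PySem.List.pySetD v p.1 p.2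
      else if p.2 = 'X' then PySem.List.pySetD v p.1 p.2
      else v)
    (pvBits val)
  ((getPossible v).filter (fun x => PySem.Chars.find x ['X'] == -1)).map pvInt2

def part2 (data : List (String × (List (Int × Int)))) : Int :=
  let fv := data.foldl
    (fun fv g => g.2.foldl
      (fun fv mem => (maskNum2 mem.1 g.1.toList).foldl (fun fv loc => fv.insert loc mem.2) fv)
      fv)
    (PySem.Dict.empty : PySem.Dict Int Int)
  -- for x in finalValues: total += finalValues[x]  (finalValues[x] = getD, key always present)
  fv.keys.foldl (fun total x => total + fv.getD x 0) 0

-- ===== PORT B =====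

-- [n for n, c in enumerate(pat) if c == "X"]
def pvXpos (pat : List Char) : List Int :=
  ((PySem.List.enumerate pat 0).filter (fun p => p.2 == 'X')).map (·.1)

-- the candidate-doubling loop of Source B: per floating position, split every candidate in two
def pvExpand (xpos : List Int) (start : List (List Char)) : List (List Char) :=
  xpos.foldl
    (fun cands n =>
      cands.foldl
        (fun nxt c => (nxt ++ [PySem.List.pySetD c n '0']) ++ [PySem.List.pySetD c n '1'])
        [])
    start

def part2_alt (data : List (String × (List (Int × Int)))) : Int :=
  let fv := data.foldl
    (fun fv g => g.2.foldl
      (fun fv mem =>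
        let pat := (PySem.List.enumerate g.1.toList 0).foldl
          (fun v p => if p.2 = '1' ∨ p.2 = 'X' then PySem.List.pySetD v p.1 p.2 else v)
          (pvBits mem.1)
        let xpos := pvXpos pat
        if xpos ≠ [] then
          (pvExpand xpos [pat]).foldl (fun fv c => fv.insert (pvInt2 c) mem.2) fv
        else fv)
      fv)
    (PySem.Dict.empty : PySem.Dict Int Int)
  fv.values.sum

-- ===== PRECONDITION & SPEC =====

-- Pre_ excludes writes with a negative address under a mask containing 'X' (int(·,2) then hits the
-- 'b' of bin(negative): ValueError) and masks placing '1'/'X' at an index ≥ 36 (IndexError on the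
-- 36-char pattern); it is slightly conservative: in the rare corner where the mask overwrites the
-- 'b' of a negative address A still returns — and B returns the same value there.
def Pre_part2 (data : List (String × (List (Int × Int)))) : Prop :=
  ∀ g ∈ data, ∀ mem ∈ g.2,
    (0 ≤ mem.1 ∨ (g.1.toList.all (fun c => !(c == 'X')) = true)) ∧
      ((g.1.toList.drop 36).all (fun c => !(c == '1' || c == 'X')) = true)
instance (data : List (String × (List (Int × Int)))) : Decidable (Pre_part2 data) := by
  unfold Pre_part2; infer_instance

def pvWitness_part2 : (List (String × (List (Int × Int)))) := [("X1", [(5, 3)])]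

def Spec_part2 (data : List (String × (List (Int × Int)))) (out : Int) : Prop := out = part2_alt data
instance (data : List (String × (List (Int × Int)))) (out : Int) : Decidable (Spec_part2 data out) := by
  unfold Spec_part2; infer_instance

-- ===== CLAIM (what is proved, stated in full; the proofs are below) =====
def Claim_equal_part2 : Prop := ∀ (data : List (String × (List (Int × Int)))), Dom_part2 data → Pre_part2 data → Spec_part2 data (part2 data)

-- ===== LEMMAS AND PROOFS =====

-- A's filtered concrete completions
def pvF (cs : List Char) : List (List Char) :=
  (getPossible cs).filter (fun x => PySem.Chars.find x ['X'] == -1)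

def pvG (cs : List Char) : List (List Char) := if 'X' ∈ cs then pvF cs else [cs]

-- positions of 'X' from offset s
def pvXposFrom : List Char → Int → List Int
  | [], _ => []
  | c :: cs, s => if c = 'X' then s :: pvXposFrom cs (s + 1) else pvXposFrom cs (s + 1)

theorem pvEnumerate_cons {α : Type} (c : α) (cs : List α) (s : Int) :
    PySem.List.enumerate (c :: cs) s = (s, c) :: PySem.List.enumerate cs (s + 1) := by
  simp [PySem.List.enumerate_eq_zipIdx_map, List.zipIdx_succ]
  intro a b _; omega

theorem pvXpos_eq_from (cs : List Char) (s : Int) :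
    ((PySem.List.enumerate cs s).filter (fun p => p.2 == 'X')).map (·.1) = pvXposFrom cs s := by
  induction cs generalizing s with
  | nil => simp [PySem.List.enumerate, pvXposFrom]
  | cons c cs ih =>
    rw [pvEnumerate_cons]
    by_cases hc : c = 'X'
    · subst hc; simp [pvXposFrom, ih]
    · simp [pvXposFrom, hc, ih]

theorem pvXposFrom_nil_iff (cs : List Char) (s : Int) :
    pvXposFrom cs s = [] ↔ 'X' ∉ cs := by
  induction cs generalizing s with
  | nil => simp [pvXposFrom]
  | cons c cs ih =>
    by_cases hc : c = 'X'
    · subst hc; simp [pvXposFrom]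
    · simp [pvXposFrom, hc, ih (s + 1)]
      intro h; exact fun he => hc he.symm

theorem pvXposFrom_cons (d : Char) (hd : ¬ d = 'X') (cs : List Char) (s n : Int) (ns : List Int)
    (h : pvXposFrom cs s = n :: ns) :
    s ≤ n ∧ pvRepFirstX d cs = PySem.List.pySetD cs (n - s) d ∧
      pvXposFrom (pvRepFirstX d cs) s = ns := by
  induction cs generalizing s with
  | nil => simp [pvXposFrom] at h
  | cons c cs ih =>
    by_cases hc : c = 'X'
    · subst hc
      simp [pvXposFrom] at h
      obtain ⟨rfl, hns⟩ := h
      refine ⟨le_refl _, ?_, ?_⟩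
      · simp [pvRepFirstX, PySem.List.pySetD_of_nonneg _ d (le_refl 0)]
      · simp [pvRepFirstX, pvXposFrom, hd, hns]
    · simp only [pvXposFrom, if_neg hc] at h
      obtain ⟨hle, hrep, hx⟩ := ih (s + 1) h
      refine ⟨by omega, ?_, ?_⟩
      · simp only [pvRepFirstX, if_neg hc, hrep]
        rw [PySem.List.pySetD_of_nonneg _ d (by omega : (0:Int) ≤ n - s),
            PySem.List.pySetD_of_nonneg _ d (by omega : (0:Int) ≤ n - (s + 1))]
        have hk : (n - s).toNat = (n - (s + 1)).toNat + 1 := by omega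
        rw [hk]
        rfl
      · show pvXposFrom (pvRepFirstX d (c :: cs)) s = ns
        simp only [pvRepFirstX, if_neg hc]
        simp only [pvXposFrom, if_neg hc, hx]

theorem pvInner_flatMap (xs : List (List Char)) (n : Int) (acc : List (List Char)) :
    xs.foldl
      (fun nxt c => (nxt ++ [PySem.List.pySetD c n '0']) ++ [PySem.List.pySetD c n '1']) acc
    = acc ++ xs.flatMap (fun c => [PySem.List.pySetD c n '0', PySem.List.pySetD c n '1']) := by
  rw [PySem.List.foldl_congr_mem _ _
        (fun nxt c => nxt ++ [PySem.List.pySetD c n '0', PySem.List.pySetD c n '1']) _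
        (by intro a x _; simp)]
  exact PySem.List.foldl_append_eq_flatMap _ _ _

theorem pvExpand_append (ps : List Int) (l1 l2 : List (List Char)) :
    pvExpand ps (l1 ++ l2) = pvExpand ps l1 ++ pvExpand ps l2 := by
  induction ps generalizing l1 l2 with
  | nil => simp [pvExpand]
  | cons p ps ih =>
    simp only [pvExpand, List.foldl_cons] at ih ⊢
    rw [pvInner_flatMap, pvInner_flatMap, pvInner_flatMap]
    simp only [List.nil_append, List.flatMap_append]
    exact ih _ _

theorem pvGetPossible_nil (cs : List Char) (h : 'X' ∉ cs) : getPossible cs = [] := by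
  rw [getPossible, dif_neg]
  intro hh; exact h ((pvIsInX_iff cs).mp hh)

theorem pvF_nil (cs : List Char) (h : 'X' ∉ cs) : pvF cs = [] := by
  unfold pvF
  rw [pvGetPossible_nil cs h]
  rfl

theorem pvConc_iff (x : List Char) :
    ((PySem.Chars.find x ['X'] == -1) = true) ↔ 'X' ∉ x := by
  rw [beq_iff_eq, PySem.Chars.find_eq_neg_one_iff]
  constructor
  · intro hinf hm
    obtain ⟨s, t, rfl⟩ := List.append_of_mem hm
    exact hinf ⟨s, t, by simp⟩
  · rintro hm ⟨s, t, rfl⟩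
    exact hm (by simp)

theorem pvF_split (cs : List Char) (h : 'X' ∈ cs) :
    pvF cs = pvG (pvRepFirstX '0' cs) ++ pvG (pvRepFirstX '1' cs) := by
  have side : ∀ s : List Char,
      (getPossible s).filter (fun x => PySem.Chars.find x ['X'] == -1) = pvF s :=
    fun _ => rfl
  have hside : ∀ s : List Char,
      (if (PySem.Chars.find s ['X'] == -1) = true then s :: pvF s else pvF s) = pvG s := by
    intro s
    by_cases hm : 'X' ∈ s
    · rw [if_neg, pvG, if_pos hm]
      simp [pvConc_iff s, hm]
    · rw [if_pos ((pvConc_iff s).mpr hm), pvG, if_neg hm, pvF_nil s hm]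
  unfold pvF
  rw [getPossible, dif_pos ((pvIsInX_iff cs).mpr h)]
  rw [List.filter_append, List.filter_cons, List.filter_cons]
  rw [side, side, hside, hside]

theorem pvG_eq_expand (k : Nat) (cs : List Char) (h : (pvXposFrom cs 0).length = k) :
    pvG cs = pvExpand (pvXposFrom cs 0) [cs] := by
  induction k generalizing cs with
  | zero =>
    have hnil : pvXposFrom cs 0 = [] := List.length_eq_zero_iff.mp h
    have hm : 'X' ∉ cs := (pvXposFrom_nil_iff cs 0).mp hnil
    rw [hnil, pvG, if_neg hm]
    rfl
  | succ k ih =>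
    cases hx : pvXposFrom cs 0 with
    | nil => rw [hx] at h; simp at h
    | cons n ns =>
      have hm : 'X' ∈ cs := by
        by_contra hm
        rw [(pvXposFrom_nil_iff cs 0).mpr hm] at hx
        simp at hx
      obtain ⟨-, hrep0, hx0⟩ := pvXposFrom_cons '0' (by decide) cs 0 n ns hx
      obtain ⟨-, hrep1, hx1⟩ := pvXposFrom_cons '1' (by decide) cs 0 n ns hx
      rw [Int.sub_zero] at hrep0 hrep1
      have hlen : (pvXposFrom (pvRepFirstX '0' cs) 0).length = k := by
        rw [hx0]; rw [hx] at h; simpa using h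
      have hlen1 : (pvXposFrom (pvRepFirstX '1' cs) 0).length = k := by
        rw [hx1]; rw [hx] at h; simpa using h
      have e0 := ih (pvRepFirstX '0' cs) hlen
      have e1 := ih (pvRepFirstX '1' cs) hlen1
      rw [hx0] at e0
      rw [hx1] at e1
      have hsplit : pvExpand (n :: ns) [cs]
          = pvExpand ns [pvRepFirstX '0' cs] ++ pvExpand ns [pvRepFirstX '1' cs] := by
        simp only [pvExpand, List.foldl_cons, List.foldl_nil, List.nil_append]
        rw [← hrep0, ← hrep1]
        exact pvExpand_append ns [pvRepFirstX '0' cs] [pvRepFirstX '1' cs]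
      rw [pvG, if_pos hm, pvF_split cs hm, e0, e1, hsplit]

-- A's per-write step equals B's per-write step
theorem pvMem_eq (val v : Int) (mask : List Char) (fv : PySem.Dict Int Int) :
    (maskNum2 val mask).foldl (fun fv loc => fv.insert loc v) fv
    = (let pat := (PySem.List.enumerate mask 0).foldl
          (fun w p => if p.2 = '1' ∨ p.2 = 'X' then PySem.List.pySetD w p.1 p.2 else w)
          (pvBits val)
       let xpos := pvXpos pat
       if xpos ≠ [] then
         (pvExpand xpos [pat]).foldl (fun fv c => fv.insert (pvInt2 c) v) fv
       else fv) := by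
  have hpat : (PySem.List.enumerate mask 0).foldl
      (fun v p =>
        if p.2 = '1' then PySem.List.pySetD v p.1 p.2
        else if p.2 = 'X' then PySem.List.pySetD v p.1 p.2
        else v)
      (pvBits val)
      = (PySem.List.enumerate mask 0).foldl
        (fun w p => if p.2 = '1' ∨ p.2 = 'X' then PySem.List.pySetD w p.1 p.2 else w)
        (pvBits val) := by
    apply PySem.List.foldl_congr_mem
    intro acc p _
    by_cases h1 : p.2 = '1' <;> by_cases h2 : p.2 = 'X' <;> simp [h1, h2]
  show (maskNum2 val mask).foldl (fun fv loc => fv.insert loc v) fv = _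
  unfold maskNum2
  rw [hpat]
  set pat := (PySem.List.enumerate mask 0).foldl
      (fun w p => if p.2 = '1' ∨ p.2 = 'X' then PySem.List.pySetD w p.1 p.2 else w)
      (pvBits val) with hpatdef
  have hxpos : pvXpos pat = pvXposFrom pat 0 := pvXpos_eq_from pat 0
  show (((getPossible pat).filter (fun x => PySem.Chars.find x ['X'] == -1)).map pvInt2).foldl
      (fun fv loc => fv.insert loc v) fv
    = if pvXpos pat ≠ [] then
        (pvExpand (pvXpos pat) [pat]).foldl (fun fv c => fv.insert (pvInt2 c) v) fv
      else fv
  by_cases hm : 'X' ∈ pat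
  · have hne' : pvXpos pat ≠ [] := by
      rw [hxpos]
      intro h0
      exact ((pvXposFrom_nil_iff pat 0).mp h0) hm
    have hGF : pvF pat = pvExpand (pvXposFrom pat 0) [pat] := by
      have hG := pvG_eq_expand (pvXposFrom pat 0).length pat rfl
      rwa [pvG, if_pos hm] at hG
    rw [if_pos hne',
        show ((getPossible pat).filter (fun x => PySem.Chars.find x ['X'] == -1)) = pvF pat
          from rfl,
        hGF, ← hxpos, List.foldl_map]
  · have h0 : pvXpos pat = [] := by
      rw [hxpos]
      exact (pvXposFrom_nil_iff pat 0).mpr hm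
    rw [if_neg (by simp [h0]), pvGetPossible_nil pat hm]
    rfl

theorem pvFoldl_preserve {α σ : Type} (P : σ → Prop) (f : σ → α → σ)
    (h : ∀ s a, P s → P (f s a)) (l : List α) (s : σ) (hs : P s) : P (l.foldl f s) := by
  induction l generalizing s with
  | nil => exact hs
  | cons a l ih => exact ih _ (h _ _ hs)

theorem pvFoldl_add_map {α : Type} (f : α → Int) (l : List α) (c : Int) :
    l.foldl (fun t x => t + f x) c = c + (l.map f).sum := by
  induction l generalizing c with
  | nil => simp
  | cons a l ih => simp [ih]; ring

theorem pvDict_eq (data : List (String × (List (Int × Int)))) :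
    data.foldl
      (fun fv g => g.2.foldl
        (fun fv mem => (maskNum2 mem.1 g.1.toList).foldl (fun fv loc => fv.insert loc mem.2) fv)
        fv)
      (PySem.Dict.empty : PySem.Dict Int Int)
    = data.foldl
      (fun fv g => g.2.foldl
        (fun fv mem =>
          let pat := (PySem.List.enumerate g.1.toList 0).foldl
            (fun v p => if p.2 = '1' ∨ p.2 = 'X' then PySem.List.pySetD v p.1 p.2 else v)
            (pvBits mem.1)
          let xpos := pvXpos pat
          if xpos ≠ [] then
            (pvExpand xpos [pat]).foldl (fun fv c => fv.insert (pvInt2 c) mem.2) fv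
          else fv)
        fv)
      (PySem.Dict.empty : PySem.Dict Int Int) := by
  apply PySem.List.foldl_congr_mem
  intro acc g _
  apply PySem.List.foldl_congr_mem
  intro acc2 mem _
  exact pvMem_eq mem.1 mem.2 g.1.toList acc2

-- ===== VERDICT (by name: the statement is the Claim_ definition above) =====
theorem part2_spec : Claim_equal_part2 := by
  intro data _ _
  show part2 data = part2_alt data
  unfold part2 part2_alt
  show _ = ((data.foldl _ (PySem.Dict.empty : PySem.Dict Int Int)).values).sum
  rw [pvDict_eq]
  set d := data.foldl _ (PySem.Dict.empty : PySem.Dict Int Int) with hd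
  have hnd : d.keys.Nodup := by
    rw [hd]
    refine pvFoldl_preserve (fun d : PySem.Dict Int Int => d.keys.Nodup) _ ?_ _ _
      PySem.Dict.nodup_keys_empty
    intro s g hs
    refine pvFoldl_preserve (fun d : PySem.Dict Int Int => d.keys.Nodup) _ ?_ _ _ hs
    intro s2 mem hs2
    dsimp only
    split
    · refine pvFoldl_preserve (fun d : PySem.Dict Int Int => d.keys.Nodup) _ ?_ _ _ hs2
      intro s3 c hs3
      exact PySem.Dict.nodup_keys_insert _ _ _ hs3
    · exact hs2
  rw [pvFoldl_add_map, PySem.Dict.values_eq_map_keys d hnd 0]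
  simp
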